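-- pv_equiv track=rewrite | github.com/hedieh-hj/os-lab | 3/is it factorial.py | isFactorialFunc
-- ===== SOURCE A (Python) =====
-- def isFactorialFunc(n):
--     sum = 1
--     i=1
--     while sum<=n:
--         sum*=i
--         i+=1
--         if sum==n:
--             return True
--     return False
-- ===== SOURCE B (Python) =====
-- def isFactorialFunc(n):
--     if n <= 0:
--         return False
--     i = 2
--     while n % i == 0:
--         n //= i
--         i += 1
--     return n == 1
-- ===== Notes on version B (the rewrite author's own statement) =====
-- stated objective: alternative
-- what changed: B checks factorial-ness by peeling n down with trial division by successive integers until the residue is one, instead of A's building up the running factorial product and comparing it to n.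
import Mathlib
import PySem

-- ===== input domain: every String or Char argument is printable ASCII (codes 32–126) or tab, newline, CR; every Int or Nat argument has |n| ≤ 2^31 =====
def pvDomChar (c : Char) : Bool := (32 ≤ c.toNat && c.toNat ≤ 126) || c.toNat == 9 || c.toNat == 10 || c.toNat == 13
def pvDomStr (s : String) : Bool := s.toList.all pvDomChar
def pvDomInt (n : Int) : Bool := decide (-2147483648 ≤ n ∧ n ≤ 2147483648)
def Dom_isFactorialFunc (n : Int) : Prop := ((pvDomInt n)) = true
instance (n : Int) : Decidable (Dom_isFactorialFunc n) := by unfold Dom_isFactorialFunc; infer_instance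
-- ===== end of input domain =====

-- B re-checks factorial-ness by trial-division peeling (dividing n by successive integers
-- until the residue is one) instead of A's building up the running product; same cost, different decomposition.

-- ===== PORT A =====
-- A's while loop as structural recursion on a fuel counter (a totality guard only:
-- the top-level call supplies enough fuel, proved in the lemmas below).
def isFactorialFuncLoop (fuel : Nat) (n sum i : Int) : Bool :=
  match fuel with
  | 0 => false
  | fuel + 1 =>
    if sum ≤ n then
      let s := sum * i
      if s = n then true
      else isFactorialFuncLoop fuel n s (i + 1)
    else false

def isFactorialFunc (n : Int) : Bool :=
  isFactorialFuncLoop (2 * n.toNat + 3) n 1 1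

-- ===== PORT B =====
-- B's while loop as structural recursion on a fuel counter (a totality guard only:
-- the top-level call supplies enough fuel, proved in the lemmas below).
def isFactorialFuncAltLoop (fuel : Nat) (n i : Int) : Bool :=
  match fuel with
  | 0 => false
  | fuel + 1 =>
    if PySem.Int.mod n i = 0 then
      isFactorialFuncAltLoop fuel (PySem.Int.floordiv n i) (i + 1)
    else decide (n = 1)

def isFactorialFunc_alt (n : Int) : Bool :=
  if n ≤ 0 then false
  else isFactorialFuncAltLoop n.toNat n 2

-- ===== PRECONDITION & SPEC =====
def Spec_isFactorialFunc (n : Int) (out : Bool) : Prop := out = isFactorialFunc_alt n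
instance (n : Int) (out : Bool) : Decidable (Spec_isFactorialFunc n out) := by unfold Spec_isFactorialFunc; infer_instance

-- ===== CLAIM (what is proved, stated in full; the proofs are below) =====
def Claim_equal_isFactorialFunc : Prop := ∀ (n : Int), Dom_isFactorialFunc n → Spec_isFactorialFunc n (isFactorialFunc n)

-- ===== LEMMAS AND PROOFS =====

def F (k : Nat) : Int := (Nat.factorial k : Int)

theorem F_pos (k : Nat) : 1 ≤ F k := by
  unfold F; exact_mod_cast Nat.factorial_pos k

theorem F_succ (k : Nat) : F (k + 1) = F k * ((k : Int) + 1) := by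
  unfold F; rw [Nat.factorial_succ]; push_cast; ring

theorem F_mono {a b : Nat} (h : a ≤ b) : F a ≤ F b := by
  unfold F; exact_mod_cast Nat.factorial_le h

theorem loopA_succ (f : Nat) (n sum i : Int) :
    isFactorialFuncLoop (f + 1) n sum i
      = if sum ≤ n then (if sum * i = n then true else isFactorialFuncLoop f n (sum * i) (i + 1))
        else false := rfl

theorem loopA_stop (f : Nat) (n sum i : Int) (h : ¬ sum ≤ n) :
    isFactorialFuncLoop (f + 1) n sum i = false := by
  rw [loopA_succ, if_neg h]

theorem loopA_hit (f : Nat) (n sum i : Int) (h : sum ≤ n) (heq : sum * i = n) :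
    isFactorialFuncLoop (f + 1) n sum i = true := by
  rw [loopA_succ, if_pos h, if_pos heq]

theorem loopA_rec (f : Nat) (n sum i : Int) (h : sum ≤ n) (hne : ¬ sum * i = n) :
    isFactorialFuncLoop (f + 1) n sum i = isFactorialFuncLoop f n (sum * i) (i + 1) := by
  rw [loopA_succ, if_pos h, if_neg hne]

-- A's loop from a reachable state (sum = j!, i = j+1, j ≥ 1), with enough fuel,
-- returns true iff some later running product j!·(j+1)···k equals n
theorem loopA_iff (n : Int) : ∀ (fuel : Nat) (j : Nat), 1 ≤ j →
    2 * (n + 1 - F j).toNat + 1 ≤ fuel →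
    (isFactorialFuncLoop fuel n (F j) ((j:Int) + 1) = true ↔ ∃ k, j + 1 ≤ k ∧ F k = n) := by
  intro fuel
  induction fuel with
  | zero => intro j h1 hf; omega
  | succ f ih =>
    intro j h1 hf
    have hmul : F j * ((j:Int) + 1) = F (j + 1) := (F_succ j).symm
    by_cases hle : F j ≤ n
    · by_cases heq : F j * ((j:Int) + 1) = n
      · rw [loopA_hit f n _ _ hle heq]
        exact iff_of_true rfl ⟨j + 1, le_refl _, by rw [← hmul, heq]⟩
      · have hlt : F j + 1 ≤ F (j + 1) := by
          rw [F_succ]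
          have h1' : (1:Int) ≤ (j:Int) := by exact_mod_cast h1
          nlinarith [F_pos j]
        have hcast : ((j:Int) + 1) + 1 = ((j + 1 : Nat) : Int) + 1 := by push_cast; ring
        rw [loopA_rec f n _ _ hle heq, hmul, hcast]
        rw [ih (j + 1) (by omega) (by omega)]
        constructor
        · rintro ⟨k, hk, hkn⟩; exact ⟨k, by omega, hkn⟩
        · rintro ⟨k, hk, hkn⟩
          refine ⟨k, ?_, hkn⟩
          rcases Nat.eq_or_lt_of_le hk with h | h
          · exfalso; rw [hmul] at heq; rw [← h] at hkn; exact heq hkn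
          · omega
    · rw [loopA_stop f n _ _ hle]
      refine iff_of_false (by simp) ?_
      rintro ⟨k, hk, hkn⟩
      have : F j ≤ F k := F_mono (by omega)
      omega

-- A returns true exactly on the factorials 1!, 2!, 3!, …
theorem A_iff (n : Int) : isFactorialFunc n = true ↔ ∃ k, 1 ≤ k ∧ F k = n := by
  unfold isFactorialFunc
  rw [show 2 * n.toNat + 3 = (2 * n.toNat + 2) + 1 from rfl]
  by_cases hle : (1:Int) ≤ n
  · by_cases heq : n = 1
    · subst heq
      rw [loopA_hit _ 1 1 1 (le_refl 1) (by ring)]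
      exact iff_of_true rfl ⟨1, le_refl _, by unfold F; norm_num⟩
    · rw [loopA_rec _ n 1 1 hle (by omega)]
      rw [show (1:Int) * 1 = F 1 from by norm_num [F, Nat.factorial],
          show (1:Int) + 1 = ((1:Nat):Int) + 1 from by norm_num]
      rw [loopA_iff n _ 1 (le_refl 1) (by have hF1 : F 1 = 1 := by norm_num [F, Nat.factorial]
                                          omega)]
      constructor
      · rintro ⟨k, hk, hkn⟩; exact ⟨k, by omega, hkn⟩
      · rintro ⟨k, hk, hkn⟩
        refine ⟨k, ?_, hkn⟩
        rcases Nat.eq_or_lt_of_le hk with h | h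
        · exfalso
          rw [← h] at hkn
          norm_num [F, Nat.factorial] at hkn
          exact heq hkn.symm
        · omega
  · rw [loopA_stop _ n 1 1 hle]
    refine iff_of_false (by simp) ?_
    rintro ⟨k, hk, hkn⟩
    have := F_pos k
    omega

theorem loopB_succ (f : Nat) (n i : Int) :
    isFactorialFuncAltLoop (f + 1) n i
      = if PySem.Int.mod n i = 0 then isFactorialFuncAltLoop f (PySem.Int.floordiv n i) (i + 1)
        else decide (n = 1) := rfl

-- a factorial k! with k ≥ j+2 is (j+1)! times a multiple of (j+2)
theorem fact_ratio (j : Nat) : ∀ k, j + 2 ≤ k →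
    ∃ R : Int, F k = F (j + 1) * R ∧ ((j:Int) + 2) ∣ R := by
  intro k hk
  induction k, hk using Nat.le_induction with
  | base =>
    refine ⟨(j:Int) + 2, ?_, dvd_refl _⟩
    rw [show j + 2 = (j + 1) + 1 by ring, F_succ (j + 1)]
    push_cast; ring
  | succ k hk ih =>
    obtain ⟨R, hR, hd⟩ := ih
    exact ⟨((k:Int) + 1) * R, by rw [F_succ k, hR]; ring, Dvd.dvd.mul_left hd _⟩

-- B's loop from a reachable state (i = j+2, the divisors 2..j+1 already peeled off),
-- with enough fuel, returns true iff n·(j+1)! is a factorial k! with k ≥ j+1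
theorem loopB_iff : ∀ (fuel : Nat) (n : Int) (j : Nat), 1 ≤ n → n.toNat ≤ fuel →
    (isFactorialFuncAltLoop fuel n ((j:Int) + 2) = true ↔
      ∃ k, j + 1 ≤ k ∧ F k = n * F (j + 1)) := by
  intro fuel
  induction fuel with
  | zero => intro n j hn hf; omega
  | succ f ih =>
    intro n j hn hf
    by_cases h : PySem.Int.mod n ((j:Int) + 2) = 0
    · have hd2 : ((j:Int) + 2) ∣ n := (PySem.Int.mod_eq_zero_iff_dvd n _).mp h
      have hin : (j:Int) + 2 ≤ n := Int.le_of_dvd (by omega) hd2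
      have hq : PySem.Int.floordiv n ((j:Int) + 2) = n / ((j:Int) + 2) :=
        PySem.Int.floordiv_eq_ediv_of_pos (by omega)
      have hmulq : n / ((j:Int) + 2) * ((j:Int) + 2) = n := Int.ediv_mul_cancel hd2
      have hq1 : 1 ≤ n / ((j:Int) + 2) := by
        by_contra hc
        push_neg at hc
        nlinarith [hmulq]
      have hqf : (n / ((j:Int) + 2)).toNat ≤ f := by
        have : n / ((j:Int) + 2) < n := by nlinarith [hmulq]
        omega
      rw [loopB_succ, if_pos h, hq,
          show ((j:Int) + 2) + 1 = ((j + 1 : Nat):Int) + 2 from by push_cast; ring]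
      rw [ih (n / ((j:Int) + 2)) (j + 1) hq1 hqf]
      have key : n / ((j:Int) + 2) * F (j + 1 + 1) = n * F (j + 1) := by
        rw [F_succ (j + 1)]
        push_cast
        calc n / ((j:Int) + 2) * (F (j + 1) * ((j:Int) + 1 + 1))
            = n / ((j:Int) + 2) * ((j:Int) + 2) * F (j + 1) := by ring
          _ = n * F (j + 1) := by rw [hmulq]
      rw [key]
      constructor
      · rintro ⟨k, hk, hkn⟩; exact ⟨k, by omega, hkn⟩
      · rintro ⟨k, hk, hkn⟩
        refine ⟨k, ?_, hkn⟩
        rcases Nat.eq_or_lt_of_le hk with hkk | hkk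
        · exfalso
          rw [← hkk] at hkn
          have h1n : (1:Int) * F (j + 1) = n * F (j + 1) := by rw [one_mul]; exact hkn
          have : (1:Int) = n := mul_right_cancel₀ (by have := F_pos (j + 1); omega) h1n
          omega
        · omega
    · rw [loopB_succ, if_neg h]
      by_cases hn1 : n = 1
      · subst hn1
        refine iff_of_true (by simp) ⟨j + 1, le_refl _, by rw [one_mul]⟩
      · refine iff_of_false (by simp [hn1]) ?_
        rintro ⟨k, hk, hkn⟩
        rcases Nat.eq_or_lt_of_le hk with hkk | hkk
        · rw [← hkk] at hkn
          have h1n : (1:Int) * F (j + 1) = n * F (j + 1) := by rw [one_mul]; exact hkn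
          have : (1:Int) = n := mul_right_cancel₀ (by have := F_pos (j + 1); omega) h1n
          exact hn1 this.symm
        · obtain ⟨R, hR, hdvd⟩ := fact_ratio j k (by omega)
          rw [hR] at hkn
          have hRn : R = n := by
            have := F_pos (j + 1)
            have hkn' : F (j + 1) * R = F (j + 1) * n := by rw [hkn]; ring
            exact mul_left_cancel₀ (by omega) hkn'
          exact h ((PySem.Int.mod_eq_zero_iff_dvd n _).mpr (hRn ▸ hdvd))

-- B returns true exactly on the factorials 1!, 2!, 3!, …
theorem B_iff (n : Int) : isFactorialFunc_alt n = true ↔ ∃ k, 1 ≤ k ∧ F k = n := by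
  unfold isFactorialFunc_alt
  by_cases h : n ≤ 0
  · rw [if_pos h]
    refine iff_of_false (by simp) ?_
    rintro ⟨k, hk, hkn⟩
    have := F_pos k
    omega
  · rw [if_neg h]
    rw [show (2:Int) = ((0:Nat):Int) + 2 from by norm_num]
    rw [loopB_iff n.toNat n 0 (by omega) (le_refl _)]
    have hF1 : F (0 + 1) = 1 := by norm_num [F, Nat.factorial]
    rw [hF1]
    simp only [mul_one]


-- ===== VERDICT (by name: the statement is the Claim_ definition above) =====
theorem isFactorialFunc_spec : Claim_equal_isFactorialFunc := by
  intro n _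
  unfold Spec_isFactorialFunc
  rw [Bool.eq_iff_iff, A_iff, B_iff]
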